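-- pv_equiv track=rewrite | github.com/sechlol/exo-finder | exo_finder/utils/parallel_execution.py | _chunked_from_iterable
-- ===== SOURCE A (Python) =====
-- import itertools
-- from collections.abc import Iterable, Sequence
-- from typing import Any, Callable, Generator, Optional
--
-- def _chunked_from_iterable(it: Iterable[Any], batch_size: int) -> Generator[tuple[int, list[Any]], None, None]:
--     it = iter(it)
--     idx = 0
--     while True:
--         chunk = list(itertools.islice(it, batch_size))
--         if not chunk:
--             break
--         yield idx, chunk
--         idx += len(chunk)
-- ===== SOURCE B (Python) =====
-- def _chunked_from_iterable(it, batch_size):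
--     if batch_size <= 0:
--         return
--     start = 0
--     buffer = []
--     for x in it:
--         buffer.append(x)
--         if len(buffer) == batch_size:
--             yield start, buffer
--             start += batch_size
--             buffer = []
--     if buffer:
--         yield start, buffer
-- ===== Notes on version B (the rewrite author's own statement) =====
-- stated objective: alternative
-- what changed: Replaces the while-loop that materialises each chunk with itertools.islice by a single for-loop over the elements that accumulates a buffer and flushes it whenever it reaches batch_size; a natural batch_size <= 0 guard yields nothing there.
import Mathlib
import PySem

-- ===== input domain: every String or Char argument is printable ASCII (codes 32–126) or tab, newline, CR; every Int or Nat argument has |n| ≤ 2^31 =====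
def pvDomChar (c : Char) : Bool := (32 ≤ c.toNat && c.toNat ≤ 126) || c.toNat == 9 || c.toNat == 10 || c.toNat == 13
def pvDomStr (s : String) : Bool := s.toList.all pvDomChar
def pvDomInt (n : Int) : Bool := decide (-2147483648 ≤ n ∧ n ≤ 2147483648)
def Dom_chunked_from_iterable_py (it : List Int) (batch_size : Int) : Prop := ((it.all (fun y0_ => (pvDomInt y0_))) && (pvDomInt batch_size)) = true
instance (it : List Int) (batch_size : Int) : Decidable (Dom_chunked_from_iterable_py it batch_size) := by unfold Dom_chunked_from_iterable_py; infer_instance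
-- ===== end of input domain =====

-- B replaces A's islice-per-chunk while-loop by a single element-wise fold with a buffer
-- flushed at batch_size (objective: alternative decomposition, same cost).


-- ===== PORT A =====
-- while True: chunk = list(islice(it, batch_size)); if not chunk: break; yield (idx, chunk); idx += len(chunk)
def chunked_go (it : List Int) (bs : Nat) (idx : Int) : List (Int × List Int) :=
  let chunk := it.take bs
  if h : chunk = [] then []
  else (idx, chunk) :: chunked_go (it.drop bs) bs (idx + (chunk.length : Int))
termination_by it.length
decreasing_by
  simp only [chunk] at h
  have h1 : it ≠ [] := by intro he; simp [he] at h
  have h2 : 0 < bs := by cases bs with | zero => simp at h | succ n => omega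
  have := List.length_pos_iff.mpr h1
  simp [List.length_drop]; omega

def chunked_from_iterable_py (it : List Int) (batch_size : Int) : List (Int × List Int) :=
  chunked_go it batch_size.toNat 0

-- ===== PORT B =====
-- body of the for-loop: append x to the buffer; flush when it reaches batch_size
def chunked_alt_step (b : Int) (st : Int × List Int × List (Int × List Int)) (x : Int) :
    Int × List Int × List (Int × List Int) :=
  let buf := st.2.1 ++ [x]
  if (buf.length : Int) = b then (st.1 + b, [], st.2.2 ++ [(st.1, buf)])
  else (st.1, buf, st.2.2)

def chunked_from_iterable_py_alt (it : List Int) (batch_size : Int) : List (Int × List Int) :=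
  if batch_size ≤ 0 then []
  else
    let st := it.foldl (chunked_alt_step batch_size) (0, [], [])
    if st.2.1 = [] then st.2.2 else st.2.2 ++ [(st.1, st.2.1)]

-- ===== PRECONDITION & SPEC =====
-- Pre_ excludes negative batch_size, on which Python A raises ValueError (from islice).
def Pre_chunked_from_iterable_py (it : List Int) (batch_size : Int) : Prop := 0 ≤ batch_size
instance (it : List Int) (batch_size : Int) : Decidable (Pre_chunked_from_iterable_py it batch_size) := by unfold Pre_chunked_from_iterable_py; infer_instance

def pvWitness_chunked_from_iterable_py : List Int × Int := ([1, 2, 3, 4, 5], 2)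

def Spec_chunked_from_iterable_py (it : List Int) (batch_size : Int) (out : List (Int × List Int)) : Prop := out = chunked_from_iterable_py_alt it batch_size
instance (it : List Int) (batch_size : Int) (out : List (Int × List Int)) : Decidable (Spec_chunked_from_iterable_py it batch_size out) := by unfold Spec_chunked_from_iterable_py; infer_instance

-- ===== CLAIM (what is proved, stated in full; the proofs are below) =====
def Claim_equal_chunked_from_iterable_py : Prop := ∀ (it : List Int) (batch_size : Int), Dom_chunked_from_iterable_py it batch_size → Pre_chunked_from_iterable_py it batch_size → Spec_chunked_from_iterable_py it batch_size (chunked_from_iterable_py it batch_size)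

-- ===== LEMMAS AND PROOFS =====

-- Invariant of B's fold: with a partial buffer `buf` (shorter than b) and output so far `acc`,
-- finalizing the fold over `l` produces `acc` followed by A's chunks of `buf ++ l` starting at `start`.
theorem chunked_foldl_inv (b : Int) (hb : 0 < b) (l : List Int) :
    ∀ (start : Int) (buf : List Int) (acc : List (Int × List Int)),
    (buf.length : Int) < b →
    (let st := l.foldl (chunked_alt_step b) (start, buf, acc);
     if st.2.1 = [] then st.2.2 else st.2.2 ++ [(st.1, st.2.1)])
    = acc ++ chunked_go (buf ++ l) b.toNat start := by
  induction l with
  | nil =>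
    intro start buf acc hlen
    have hlen' : buf.length < b.toNat := by omega
    by_cases hbuf : buf = []
    · subst hbuf
      simp [chunked_go]
    · have htake : buf.take b.toNat = buf := List.take_of_length_le (by omega)
      have hdrop : buf.drop b.toNat = [] := List.drop_eq_nil_of_le (by omega)
      simp only [List.foldl_nil, List.append_nil]
      rw [chunked_go]
      simp [htake, hdrop, hbuf, chunked_go]
  | cons x rest ih =>
    intro start buf acc hlen
    simp only [List.foldl_cons]
    by_cases hfull : ((buf ++ [x]).length : Int) = b
    · have hfull' : (buf.length : Int) + 1 = b := by simpa using hfull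
      have hstep : chunked_alt_step b (start, buf, acc) x
          = (start + b, [], acc ++ [(start, buf ++ [x])]) := by
        simp [chunked_alt_step, hfull']
      rw [hstep, ih (start + b) [] (acc ++ [(start, buf ++ [x])]) (by simpa using hb)]
      have hlenN : (buf ++ [x]).length = b.toNat := by
        have := hfull; omega
      have heq : buf ++ x :: rest = (buf ++ [x]) ++ rest := by simp
      rw [heq, chunked_go]
      have htake : ((buf ++ [x]) ++ rest).take b.toNat = buf ++ [x] :=
        List.take_left' hlenN
      have hdrop : ((buf ++ [x]) ++ rest).drop b.toNat = rest :=
        List.drop_left' hlenN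
      have hne : buf ++ [x] ≠ [] := by simp
      conv_rhs => rw [chunked_go]
      simp only [htake, hdrop, List.nil_append]
      rw [dif_neg hne, hfull]
      conv_rhs => rw [chunked_go]
      simp
    · have hstep : chunked_alt_step b (start, buf, acc) x
          = (start, buf ++ [x], acc) := by
        have hfull' : ¬ ((buf.length : Int) + 1 = b) := by simpa using hfull
        simp [chunked_alt_step, hfull']
      rw [hstep, ih start (buf ++ [x]) acc (by simp at hfull ⊢; omega)]
      simp

theorem chunked_go_zero (it : List Int) (idx : Int) : chunked_go it 0 idx = [] := by
  rw [chunked_go]; simp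

-- ===== VERDICT (by name: the statement is the Claim_ definition above) =====
theorem chunked_from_iterable_py_spec : Claim_equal_chunked_from_iterable_py := by
  intro it batch_size _hdom hpre
  unfold Spec_chunked_from_iterable_py chunked_from_iterable_py chunked_from_iterable_py_alt
  by_cases hle : batch_size ≤ 0
  · have : batch_size = 0 := le_antisymm hle hpre
    subst this
    simp [chunked_go_zero]
  · have hb : 0 < batch_size := by omega
    simp only [if_neg hle]
    have := chunked_foldl_inv batch_size hb it 0 [] [] (by simpa using hb)
    simpa using this.symm
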